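-- pv_equiv track=rewrite | github.com/ykosysbiolab/VPRscore | src/run_singlesample_vprscore.py | find_variant_token
-- ===== SOURCE A (Python) =====
-- def find_variant_token(tokens, variant_offset):
--     sequence_tokens = tokens[0][1:]
--     full_sequence = ""
--     token_start_positions = []
--     valid_token_count = 0
--     for token in sequence_tokens:
--         token_start_positions.append(len(full_sequence))
--         full_sequence += token
--         if token != "<pad>":
--             valid_token_count += 1
--     for i, start_pos in enumerate(token_start_positions):
--         end_pos = start_pos + len(sequence_tokens[i])
--         if start_pos <= variant_offset < end_pos:
--             return i, sequence_tokens[i], valid_token_count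
--     return None, None, valid_token_count
-- ===== SOURCE B (Python) =====
-- def find_variant_token(tokens, variant_offset):
--     sequence_tokens = tokens[0][1:]
--     valid_token_count = sum(1 for t in sequence_tokens if t != "<pad>")
--     # cumulative end offsets; ends is nondecreasing, so the containing token
--     # (first i with variant_offset < ends[i]) can be found by binary search
--     ends = []
--     total = 0
--     for t in sequence_tokens:
--         total += len(t)
--         ends.append(total)
--     if 0 <= variant_offset < total:
--         lo, hi = 0, len(ends) - 1
--         while lo < hi:
--             mid = (lo + hi) // 2
--             if variant_offset < ends[mid]:
--                 hi = mid
--             else: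
--                 lo = mid + 1
--         return lo, sequence_tokens[lo], valid_token_count
--     return None, None, valid_token_count
-- ===== Notes on version B (the rewrite author's own statement) =====
-- stated objective: alternative
-- what changed: Replaces A's precomputed start-position table plus linear enumerate scan by one pass building cumulative end offsets and a hand-written binary search over that nondecreasing array to locate the containing token.
import Mathlib
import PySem

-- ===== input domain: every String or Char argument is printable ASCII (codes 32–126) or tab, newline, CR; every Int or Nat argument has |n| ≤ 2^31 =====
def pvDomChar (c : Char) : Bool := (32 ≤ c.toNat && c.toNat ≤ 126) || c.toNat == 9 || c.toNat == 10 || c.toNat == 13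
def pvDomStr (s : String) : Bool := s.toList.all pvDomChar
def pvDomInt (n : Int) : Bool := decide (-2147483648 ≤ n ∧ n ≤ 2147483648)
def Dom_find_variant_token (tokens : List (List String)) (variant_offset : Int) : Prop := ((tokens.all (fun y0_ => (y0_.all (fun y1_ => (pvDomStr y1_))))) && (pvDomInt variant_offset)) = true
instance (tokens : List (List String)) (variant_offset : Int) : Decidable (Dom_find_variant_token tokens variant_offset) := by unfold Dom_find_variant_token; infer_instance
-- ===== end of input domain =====

-- B replaces A's start-position table and linear scan by cumulative end offsets plus a
-- binary search over that nondecreasing array (objective: alternative algorithm).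

-- ===== PORT A =====
-- first loop of A: builds (full_sequence, token_start_positions, valid_token_count)
def fvtLoop1 : List String → String × List Int × Int → String × List Int × Int
  | [], st => st
  | t :: rest, (full, poss, cnt) =>
      fvtLoop1 rest (full ++ t, poss ++ [PySem.Str.len full],
                     if t ≠ "<pad>" then cnt + 1 else cnt)

-- second loop of A: 'for i, start_pos in enumerate(token_start_positions)'
-- (the .getD "" only totalizes sequence_tokens[i]; i is always in range here)
def fvtScanA (seq : List String) (off : Int) : Int → List Int → Option Int × Option String
  | _, [] => (none, none)
  | i, start :: rest =>
      let tok := (PySem.List.pyGet? seq i).getD ""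
      if start ≤ off ∧ off < start + PySem.Str.len tok then (some i, some tok)
      else fvtScanA seq off (i + 1) rest

def find_variant_token (tokens : List (List String)) (variant_offset : Int) : Option Int × Option String × Int :=
  -- tokens[0] raises IndexError on empty tokens; Pre_ excludes that, .getD [] only totalizes
  let sequence_tokens := PySem.List.slice ((PySem.List.pyGet? tokens 0).getD []) (some 1) none
  let st := fvtLoop1 sequence_tokens ("", [], 0)
  let res := fvtScanA sequence_tokens variant_offset 0 st.2.1
  (res.1, res.2, st.2.2)

-- ===== PORT B =====
-- B's first loop: cumulative end offsets 'ends' and the running 'total'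
def fvtEndsLoop : List String → Int → List Int → List Int × Int
  | [], total, ends => (ends, total)
  | t :: rest, total, ends =>
      fvtEndsLoop rest (total + PySem.Str.len t) (ends ++ [total + PySem.Str.len t])

-- B's while-loop: binary search for the first index with variant_offset < ends[index]
-- (the .getD 0 only totalizes ends[mid]; mid is always in range here)
def fvtBS (ends : List Int) (off : Int) (lo hi : Int) : Int :=
  if h : lo < hi then
    let mid := PySem.Int.floordiv (lo + hi) 2
    if off < (PySem.List.pyGet? ends mid).getD 0 then fvtBS ends off lo mid
    else fvtBS ends off (mid + 1) hi
  else lo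
termination_by (hi - lo).toNat
decreasing_by
  · have h1 := (PySem.Int.floordiv_two_mid_bounds (le_of_lt h)).1
    have h2 : PySem.Int.floordiv (lo + hi) 2 < hi := by
      rw [PySem.Int.floordiv_lt_iff_lt_mul (by omega)]; omega
    omega
  · have h2 := (PySem.Int.floordiv_two_mid_bounds (le_of_lt h)).1
    omega

def find_variant_token_alt (tokens : List (List String)) (variant_offset : Int) : Option Int × Option String × Int :=
  let sequence_tokens := PySem.List.slice ((PySem.List.pyGet? tokens 0).getD []) (some 1) none
  -- sum(1 for t in sequence_tokens if t != "<pad>")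
  let valid : Int := ((sequence_tokens.filter (fun t => t ≠ "<pad>")).map (fun _ => (1 : Int))).sum
  let et := fvtEndsLoop sequence_tokens 0 []
  if 0 ≤ variant_offset ∧ variant_offset < et.2 then
    let lo := fvtBS et.1 variant_offset 0 ((et.1.length : Int) - 1)
    -- sequence_tokens[lo] is always in range here; .getD "" only totalizes
    (some lo, some ((PySem.List.pyGet? sequence_tokens lo).getD ""), valid)
  else (none, none, valid)

-- ===== PRECONDITION & SPEC =====
-- Pre_ excludes only tokens = [], on which Python's tokens[0] raises IndexError in both A and B.
def Pre_find_variant_token (tokens : List (List String)) (variant_offset : Int) : Prop := tokens ≠ []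
instance (tokens : List (List String)) (variant_offset : Int) : Decidable (Pre_find_variant_token tokens variant_offset) := by unfold Pre_find_variant_token; infer_instance

def pvWitness_find_variant_token : List (List String) × Int := ([["<cls>", "AB", "<pad>", "C"]], 2)

def Spec_find_variant_token (tokens : List (List String)) (variant_offset : Int) (out : Option Int × Option String × Int) : Prop := out = find_variant_token_alt tokens variant_offset
instance (tokens : List (List String)) (variant_offset : Int) (out : Option Int × Option String × Int) : Decidable (Spec_find_variant_token tokens variant_offset out) := by unfold Spec_find_variant_token; infer_instance

-- ===== CLAIM =====
def Claim_equal_find_variant_token : Prop := ∀ (tokens : List (List String)) (variant_offset : Int), Dom_find_variant_token tokens variant_offset → Pre_find_variant_token tokens variant_offset → Spec_find_variant_token tokens variant_offset (find_variant_token tokens variant_offset)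

-- ===== LEMMAS AND PROOFS =====

-- proof-side helpers --------------------------------------------------------

-- total length of the tokens
def fvtSumLen (ts : List String) : Int := (ts.map PySem.Str.len).sum

-- A's start positions (prefix sums of token lengths)
def fvtPositions (p : Int) : List String → List Int
  | [] => []
  | t :: rest => p :: fvtPositions (p + PySem.Str.len t) rest

-- cumulative end positions starting from offset p (what B's first loop builds)
def fvtAcc (p : Int) : List String → List Int
  | [] => []
  | t :: rest => (p + PySem.Str.len t) :: fvtAcc (p + PySem.Str.len t) rest

-- index of the first element greater than off (length if none)
def fvtIdxGt (off : Int) : List Int → Nat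
  | [] => 0
  | e :: rest => if off < e then 0 else fvtIdxGt off rest + 1

-- the reference single scan with a running offset, to which both ports are reduced
def fvtScanB (off : Int) : Int → Int → List String → Option Int × Option String
  | _, _, [] => (none, none)
  | i, pos, t :: rest =>
      if pos ≤ off ∧ off < pos + PySem.Str.len t then (some i, some t)
      else fvtScanB off (i + 1) (pos + PySem.Str.len t) rest

theorem fvtLen_nonneg (t : String) : 0 ≤ PySem.Str.len t := by
  rw [PySem.Str.len_eq]; exact Int.natCast_nonneg _

theorem fvtSumLen_nonneg (ts : List String) : 0 ≤ fvtSumLen ts := by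
  induction ts with
  | nil => simp [fvtSumLen]
  | cons t rest ih =>
      simp only [fvtSumLen, List.map_cons, List.sum_cons] at *
      have := fvtLen_nonneg t; omega

-- A-side reduction ----------------------------------------------------------

theorem fvtLoop1_spec (ts : List String) (full : String) (poss : List Int) (cnt : Int) :
    fvtLoop1 ts (full, poss, cnt) =
      ((fvtLoop1 ts (full, poss, cnt)).1,
       poss ++ fvtPositions (PySem.Str.len full) ts,
       cnt + ((ts.filter (fun t => t ≠ "<pad>")).map (fun _ => (1 : Int))).sum) := by
  induction ts generalizing full poss cnt with
  | nil => simp [fvtLoop1, fvtPositions]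
  | cons t rest ih =>
    simp only [fvtLoop1, fvtPositions, List.filter_cons]
    rw [ih]
    by_cases h : t = "<pad>" <;>
      simp [h, List.append_assoc, add_assoc]

theorem fvtScan_eq (ts pre : List String) (off p : Int) :
    fvtScanA (pre ++ ts) off (pre.length : Int) (fvtPositions p ts) =
      fvtScanB off (pre.length : Int) p ts := by
  induction ts generalizing pre p with
  | nil => simp [fvtPositions, fvtScanA, fvtScanB]
  | cons t rest ih =>
    simp only [fvtPositions, fvtScanA, fvtScanB, PySem.List.pyGet?_append_length,
      Option.getD_some]
    have h1 : pre ++ t :: rest = (pre ++ [t]) ++ rest := by simp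
    have h2 : (pre.length : Int) + 1 = ((pre ++ [t]).length : Int) := by
      simp [add_comm]
    rw [h1, h2, ih ((pre ++ [t])) (p + PySem.Str.len t)]

-- characterisation of the reference scan ------------------------------------

theorem fvtScanB_none (ts : List String) (off : Int) :
    ∀ (i p : Int), (off < p ∨ p + fvtSumLen ts ≤ off) → fvtScanB off i p ts = (none, none) := by
  induction ts with
  | nil => intro i p _; rfl
  | cons t rest ih =>
    intro i p hp
    have hl := fvtLen_nonneg t
    have hs := fvtSumLen_nonneg rest
    have hsum : fvtSumLen (t :: rest) = PySem.Str.len t + fvtSumLen rest := by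
      simp [fvtSumLen]
    rw [hsum] at hp
    have hnot : ¬ (p ≤ off ∧ off < p + PySem.Str.len t) := by omega
    simp only [fvtScanB, if_neg hnot]
    exact ih _ _ (by omega)

theorem fvtScanB_some (ts : List String) (off : Int) :
    ∀ (i p : Int), p ≤ off → off < p + fvtSumLen ts →
      fvtIdxGt off (fvtAcc p ts) < ts.length ∧
      fvtScanB off i p ts = (some (i + (fvtIdxGt off (fvtAcc p ts) : Int)),
                             ts[fvtIdxGt off (fvtAcc p ts)]?) := by
  induction ts with
  | nil =>
    intro i p h1 h2
    simp [fvtSumLen] at h2; omega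
  | cons t rest ih =>
    intro i p h1 h2
    have hlen : PySem.Str.len t = (t.length : Int) := by simp [PySem.Str.len_eq]
    have hsum : fvtSumLen (t :: rest) = (t.length : Int) + fvtSumLen rest := by
      simp [fvtSumLen]
    by_cases hc : off < p + (t.length : Int)
    · have hidx : fvtIdxGt off (fvtAcc p (t :: rest)) = 0 := by
        simp [fvtAcc, fvtIdxGt, hlen, hc]
      rw [hidx]
      refine ⟨by simp, ?_⟩
      have hcond : p ≤ off ∧ off < p + (t.length : Int) := ⟨h1, hc⟩
      simp only [fvtScanB, hlen]
      rw [if_pos hcond]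
      simp
    · have hrec := ih (i + 1) (p + (t.length : Int)) (by omega) (by omega)
      have hidx : fvtIdxGt off (fvtAcc p (t :: rest)) =
          fvtIdxGt off (fvtAcc (p + (t.length : Int)) rest) + 1 := by
        simp [fvtAcc, fvtIdxGt, hlen, hc]
      rw [hidx]
      refine ⟨by simp only [List.length_cons]; omega, ?_⟩
      have hcond : ¬ (p ≤ off ∧ off < p + (t.length : Int)) := by omega
      simp only [fvtScanB, hlen]
      rw [if_neg hcond]
      rw [hrec.2]
      simp only [Prod.mk.injEq, List.getElem?_cons_succ]
      exact ⟨by push_cast; ring_nf, trivial⟩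

-- B-side reduction ----------------------------------------------------------

theorem fvtEndsLoop_spec (ts : List String) :
    ∀ (total : Int) (acc : List Int),
      fvtEndsLoop ts total acc = (acc ++ fvtAcc total ts, total + fvtSumLen ts) := by
  induction ts with
  | nil => intro total acc; simp [fvtEndsLoop, fvtAcc, fvtSumLen]
  | cons t rest ih =>
    intro total acc
    have hsum : fvtSumLen (t :: rest) = PySem.Str.len t + fvtSumLen rest := by
      simp [fvtSumLen]
    simp only [fvtEndsLoop, fvtAcc, ih, hsum, Prod.mk.injEq]
    refine ⟨by simp [PySem.Str.len_eq], by simp [PySem.Str.len_eq]; ring⟩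

theorem fvtAcc_length (p : Int) (ts : List String) : (fvtAcc p ts).length = ts.length := by
  induction ts generalizing p with
  | nil => rfl
  | cons t rest ih => simp [fvtAcc, ih]

theorem fvtAcc_lb (p : Int) (ts : List String) : ∀ x ∈ fvtAcc p ts, p ≤ x := by
  induction ts generalizing p with
  | nil => simp [fvtAcc]
  | cons t rest ih =>
    intro x hx
    have hl := fvtLen_nonneg t
    simp only [fvtAcc, List.mem_cons] at hx
    rcases hx with rfl | hx
    · omega
    · have := ih (p + PySem.Str.len t) x hx; omega

theorem fvtAcc_pairwise (p : Int) (ts : List String) :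
    (fvtAcc p ts).Pairwise (· ≤ ·) := by
  induction ts generalizing p with
  | nil => simp [fvtAcc]
  | cons t rest ih =>
    simp only [fvtAcc, List.pairwise_cons]
    exact ⟨fun x hx => fvtAcc_lb _ _ x hx, ih _⟩

theorem fvtAcc_last (ts : List String) (p : Int) (h : ts ≠ []) :
    (fvtAcc p ts).getLast? = some (p + fvtSumLen ts) := by
  induction ts generalizing p with
  | nil => exact absurd rfl h
  | cons t rest ih =>
    by_cases hr : rest = []
    · subst hr; simp [fvtAcc, fvtSumLen]
    · have hne : fvtAcc (p + PySem.Str.len t) rest ≠ [] := by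
        intro h0
        have hl := fvtAcc_length (p + PySem.Str.len t) rest
        rw [h0] at hl
        exact hr (List.length_eq_zero_iff.mp hl.symm)
      have hsum : fvtSumLen (t :: rest) = PySem.Str.len t + fvtSumLen rest := by
        simp [fvtSumLen]
      rw [hsum]
      obtain ⟨y, ys, hys⟩ := List.exists_cons_of_ne_nil hne
      show ((p + PySem.Str.len t) :: fvtAcc (p + PySem.Str.len t) rest).getLast? = _
      rw [hys, List.getLast?_cons_cons, ← hys, ih _ hr]
      congr 1; ring

-- fvtIdxGt is the unique index below which everything is ≤ off and at which off < value
theorem fvtIdxGt_eq (l : List Int) (off : Int) :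
    ∀ (k : Nat) (hk : k < l.length),
      (∀ (j : Nat) (hj : j < l.length), j < k → l[j] ≤ off) → off < l[k] →
      fvtIdxGt off l = k := by
  induction l with
  | nil => intro k hk _ _; simp at hk
  | cons e rest ih =>
    intro k hk h1 h2
    by_cases he : off < e
    · have hk0 : k = 0 := by
        by_contra hne
        have := h1 0 (by simp) (by omega)
        simp at this; omega
      simp [fvtIdxGt, he, hk0]
    · have hk0 : k ≠ 0 := by
        intro h; subst h; simp at h2; omega
      obtain ⟨k', rfl⟩ : ∃ k', k = k' + 1 := ⟨k - 1, by omega⟩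
      simp only [fvtIdxGt, if_neg he]
      have := ih k' (by simpa using hk)
        (fun j hj hjk => by
          have := h1 (j + 1) (by simpa using hj) (by omega)
          simpa using this)
        (by simpa using h2)
      omega

theorem fvtBS_spec (ends : List Int) (off : Int) (hsort : ends.Pairwise (· ≤ ·)) :
    ∀ (lo hi : Int), 0 ≤ lo → lo ≤ hi → hi < (ends.length : Int) →
      (∀ (j : Nat) (hj : j < ends.length), (j : Int) < lo → ends[j] ≤ off) →
      (∀ (j : Nat) (hj : j < ends.length), hi ≤ (j : Int) → off < ends[j]) →
      fvtBS ends off lo hi = (fvtIdxGt off ends : Int) := by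
  intro lo hi
  induction hn : (hi - lo).toNat using Nat.strong_induction_on generalizing lo hi with
  | _ n ih =>
  intro hlo hlh hhi hbelow habove
  by_cases h : lo < hi
  · have hmidb := PySem.Int.floordiv_two_mid_bounds (le_of_lt h)
    have hmlt : PySem.Int.floordiv (lo + hi) 2 < hi := by
      rw [PySem.Int.floordiv_lt_iff_lt_mul (by omega)]; omega
    have hunf : fvtBS ends off lo hi =
        if off < (PySem.List.pyGet? ends (PySem.Int.floordiv (lo + hi) 2)).getD 0 then
          fvtBS ends off lo (PySem.Int.floordiv (lo + hi) 2)
        else fvtBS ends off (PySem.Int.floordiv (lo + hi) 2 + 1) hi := by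
      rw [fvtBS, dif_pos h]
    rw [hunf]
    set mid := PySem.Int.floordiv (lo + hi) 2 with hmid
    have hmr : mid.toNat < ends.length := by omega
    have hget : PySem.List.pyGet? ends mid = some ends[mid.toNat] :=
      PySem.List.pyGet?_eq_some_getElem ends (by omega) (by push_cast; omega)
    have hpw := List.pairwise_iff_getElem.1 hsort
    rw [hget]
    simp only [Option.getD_some]
    by_cases hc : off < ends[mid.toNat]
    · rw [if_pos hc]
      exact ih (hi := mid) (lo := lo) ((mid - lo).toNat) (by omega) rfl hlo (by omega)
        (by omega) hbelow
        (fun j hj hmj => by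
          rcases eq_or_lt_of_le hmj with heq | hlt
          · have : j = mid.toNat := by omega
            subst this; exact hc
          · have : ends[mid.toNat] ≤ ends[j] := hpw _ _ _ _ (by omega)
            omega)
    · rw [if_neg hc]
      exact ih (hi := hi) (lo := mid + 1) ((hi - (mid + 1)).toNat) (by omega) rfl
        (by omega) (by omega) hhi
        (fun j hj hjlt => by
          by_cases hjlo : (j : Int) < lo
          · exact hbelow j hj hjlo
          · rcases Nat.lt_or_ge j mid.toNat with hlt | hge
            · have : ends[j] ≤ ends[mid.toNat] := hpw _ _ _ _ hlt
              omega
            · have : j = mid.toNat := by omega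
              subst this; omega)
        habove
  · have heq : lo = hi := by omega
    rw [fvtBS, dif_neg h]
    have hk : lo.toNat < ends.length := by omega
    have := fvtIdxGt_eq ends off lo.toNat hk
      (fun j hj hjk => hbelow j hj (by omega))
      (habove lo.toNat hk (by omega))
    omega

-- ===== VERDICT (by name: the statement is the Claim_ definition above) =====
theorem find_variant_token_spec : Claim_equal_find_variant_token := by
  intro tokens off _ hpre
  unfold Spec_find_variant_token find_variant_token find_variant_token_alt
  obtain ⟨t0, rest, rfl⟩ : ∃ t0 rest, tokens = t0 :: rest := by
    cases tokens with
    | nil => exact absurd rfl hpre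
    | cons a b => exact ⟨a, b, rfl⟩
  simp only [PySem.List.pyGet?_zero_cons, Option.getD_some]
  set seq := PySem.List.slice t0 (some 1) none with hseq
  -- reduce port A to the reference scan
  rw [fvtLoop1_spec]
  have hlen0 : PySem.Str.len "" = 0 := by decide
  have hA := fvtScan_eq seq [] off 0
  simp only [List.nil_append, List.length_nil, Nat.cast_zero] at hA
  -- reduce port B's first loop
  rw [fvtEndsLoop_spec]
  simp only [hlen0, List.nil_append, zero_add, hA]
  by_cases hin : 0 ≤ off ∧ off < fvtSumLen seq
  · rw [if_pos hin]
    have hne : seq ≠ [] := by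
      intro hnil
      rw [hnil] at hin
      simp [fvtSumLen] at hin
      omega
    have hlenpos : 0 < seq.length := List.length_pos_iff.2 hne
    have ⟨hklt, hscan⟩ := fvtScanB_some seq off 0 0 hin.1 (by have := hin.2; omega)
    set k := fvtIdxGt off (fvtAcc 0 seq) with hk
    have hbs : fvtBS (fvtAcc 0 seq) off 0 (((fvtAcc 0 seq).length : Int) - 1) = (k : Int) := by
      apply fvtBS_spec _ _ (fvtAcc_pairwise 0 seq) _ _ (by omega)
        (by rw [fvtAcc_length]; omega) (by rw [fvtAcc_length]; omega)
        (fun j hj hjlt => by omega)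
        (fun j hj hje => by
          have hj' : j = (fvtAcc 0 seq).length - 1 := by omega
          subst hj'
          have hlast := fvtAcc_last seq 0 hne
          rw [List.getLast?_eq_getElem?, List.getElem?_eq_getElem (by omega)] at hlast
          rw [Option.some.inj hlast]
          have := hin.2; omega)
    rw [hscan, hbs]
    have hget : seq[k]? = some seq[k] := List.getElem?_eq_getElem hklt
    have hget2 : PySem.List.pyGet? seq (k : Int) = seq[k]? := PySem.List.pyGet?_natCast seq k
    simp [hget, hget2]
  · rw [if_neg hin]
    have := fvtScanB_none seq off 0 0 (by omega)
    rw [this]
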